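-- pv_equiv track=rewrite | github.com/jys0615/algo-class4-group4 | Jaeung/programmers/선인장숨기기.py | solution
-- ===== SOURCE A (Python) =====
-- from collections import deque
--
-- def solution(m, n, h, w, drops):
--     answer = []
--     # 끝까지 비가 오지 않는 칸의 시간
--     INF = len(drops) + 1
--
--     # 각 칸이 몇 번째로 비를 맞는지 순서를 기록한다.
--     time = [[INF] * n for _ in range(m)]
--     for i in range(len(drops)):
--         a, b = drops[i]
--         time[a][b] = i + 1
--
--
--     width = n - w + 1
--     row_min = [[0] * width for _ in range(m)]
--
--     for i in range(m):
--         # d에 최솟값 인덱스를 넣어준다.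
--         d = deque()
--         for j in range(n):
--             # 새로 들어오는 값보다 기존 deque 내 값들이 같거나 더 큰 경우, 해당 값들은 앞으로도 최솟값이 될 수 없으므로 pop해서 제거한다.
--             while d and time[i][d[-1]] >= time[i][j]:
--                 d.pop()
--             d.append(j)
--             # 현재 격자 범위를 벗어난 인덱스 제거
--             while d and d[0] <= j - w:
--                 d.popleft()
--             # 범위가 다 차는 순간(인덱스가 w-1 되는 순간) 이후부터 deque의 맨 앞 최솟값을 결과에 기록
--             if j >= w - 1:
--                 row_min[i][j - w + 1] = time[i][d[0]]
--
--
--     height = m - h + 1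
--     rect_min = [[0] * width for _ in range(height)]
--
--     # 행 방향이 아니라 열 방향으로도 같은 작업을 반복한다.
--     for j in range(width):
--         d = deque()
--         for i in range(m):
--             while d and row_min[d[-1]][j] >= row_min[i][j]:
--                 d.pop()
--             d.append(i)
--             while d and d[0] <= i - h:
--                 d.popleft()
--             if i >= h - 1:
--                 rect_min[i - h + 1][j] = row_min[d[0]][j]
--
--
--     # 선인장 구역에 대하여 가장 먼저 비를 맞는 시간(최솟값)을 다 구했으므로 이 중에서 가장 늦은 시간(최댓값)을 구하면 된다.
--     maximum = -1
--     answer = [0, 0]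
--
--     for i in range(height):
--         for j in range(width):
--             if rect_min[i][j] > maximum:
--                 # 가장 늦게 비를 맞는 시간(최댓값)을 계속 업데이트하고, 그때의 왼쪽 위칸의 좌표를 answer에 저장한다.
--                 maximum = rect_min[i][j]
--                 answer = [i, j]
--
--
--     return answer
-- ===== SOURCE B (Python) =====
-- def solution(m, n, h, w, drops):
--     INF = len(drops) + 1
--     time = [[INF] * n for _ in range(m)]
--     for idx, (a, b) in enumerate(drops):
--         time[a][b] = idx + 1
--     height, width = m - h + 1, n - w + 1
--     maximum, answer = -1, [0, 0]
--     for i in range(height):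
--         for j in range(width):
--             cur = min(time[x][y] for x in range(i, i + h) for y in range(j, j + w))
--             if cur > maximum:
--                 maximum, answer = cur, [i, j]
--     return answer
-- ===== Notes on version B (the rewrite author's own statement) =====
-- stated objective: simpler
-- what changed: B drops A's two monotonic-deque sliding-minimum passes and the row_min/rect_min tables entirely: it computes each rectangle's minimum directly with a nested min over the h*w window inside the same row-major scan with the same strict '>' tie-break.
-- outside the precondition, e.g. on solution(0, 5, 0, 1, []): A returns [0, 0], B raises ValueError; on solution(2, 0, 1, 0, []): A returns [0, 0], B raises ValueError
import Mathlib
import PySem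

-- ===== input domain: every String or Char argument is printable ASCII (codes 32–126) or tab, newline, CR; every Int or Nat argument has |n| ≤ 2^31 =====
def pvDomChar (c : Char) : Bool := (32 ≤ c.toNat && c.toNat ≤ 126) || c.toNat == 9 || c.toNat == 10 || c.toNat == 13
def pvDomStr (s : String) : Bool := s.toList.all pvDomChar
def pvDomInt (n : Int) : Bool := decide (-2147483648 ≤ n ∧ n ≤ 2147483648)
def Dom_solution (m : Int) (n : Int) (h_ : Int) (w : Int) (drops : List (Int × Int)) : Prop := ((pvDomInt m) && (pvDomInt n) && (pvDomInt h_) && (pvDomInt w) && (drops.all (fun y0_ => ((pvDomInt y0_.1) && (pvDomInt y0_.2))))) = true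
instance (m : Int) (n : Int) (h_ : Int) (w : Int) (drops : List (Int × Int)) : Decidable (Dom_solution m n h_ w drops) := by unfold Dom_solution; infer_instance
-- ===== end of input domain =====

-- B replaces A's two monotonic-deque sliding-minimum passes (row_min / rect_min tables) by a direct
-- nested min over each h×w window inside the same row-major scan; objective: simpler (B is not faster).

-- ===== PORT A =====
-- `xs[k]` / nested `grid[k]` read (exact under Pre_: index in range; negative wrap as in Python)
def tget (t : List Int) (k : Int) : Int := PySem.List.pyGetD t k 0
def tgetL (g : List (List Int)) (k : Int) : List Int := PySem.List.pyGetD g k []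

-- `time = [[INF]*n for _ in range(m)]; for i in range(len(drops)): a,b = drops[i]; time[a][b] = i+1`
-- (shared by both ports: B's Python builds the identical grid the same way)
def buildTime (m : Int) (n : Int) (drops : List (Int × Int)) : List (List Int) :=
  (PySem.List.enumerate drops 0).foldl
    (fun tm p => PySem.List.pySetD tm p.2.1 (PySem.List.pySetD (tgetL tm p.2.1) p.2.2 (p.1 + 1)))
    ((List.range m.toNat).map (fun _ => List.replicate n.toNat ((drops.length : Int) + 1)))

-- one iteration of A's deque loop body for index j:
-- `while d and t[d[-1]] >= t[j]: d.pop(); d.append(j); while d and d[0] <= j - win: d.popleft()`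
-- (a while-pop from the back is dropWhile on the reversed list; a while-popleft is dropWhile)
def dstep (t : List Int) (win : Int) (d : List Int) (j : Int) : List Int :=
  ((d.reverse.dropWhile (fun k => decide (tget t j ≤ tget t k))).reverse ++ [j]).dropWhile
    (fun k => decide (k ≤ j - win))

-- `if j >= win - 1: row[j - win + 1] = t[d[0]]`
def slideStep (t : List Int) (win : Int) (st : List Int × List Int) (j : Int) : List Int × List Int :=
  let d := dstep t win st.1 j
  (d, if win - 1 ≤ j then st.2.set (j - win + 1).toNat (tget t (d.headD 0)) else st.2)

-- A's per-line sliding-minimum pass (used for rows with (n,w) and for columns with (m,h))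
def slideMin (t : List Int) (len : Int) (win : Int) : List Int :=
  ((PySem.List.pyRange 0 len 1).foldl (slideStep t win)
    ([], List.replicate (len - win + 1).toNat 0)).2

def solution (m : Int) (n : Int) (h_ : Int) (w : Int) (drops : List (Int × Int)) : List Int :=
  let time := buildTime m n drops
  let width := n - w + 1
  let row_min := time.map (fun t => slideMin t n w)
  let height := m - h_ + 1
  let colMins := (PySem.List.pyRange 0 width 1).map
    (fun j => slideMin (row_min.map (fun r => tget r j)) m h_)
  let rect_min := (PySem.List.pyRange 0 height 1).map (fun i =>
    (PySem.List.pyRange 0 width 1).map (fun j => tget (tgetL colMins j) i))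
  ((PySem.List.pyRange 0 height 1).foldl (fun st i =>
      (PySem.List.pyRange 0 width 1).foldl (fun st j =>
        if st.1 < tget (tgetL rect_min i) j then (tget (tgetL rect_min i) j, [i, j]) else st) st)
    ((-1 : Int), ([0, 0] : List Int))).2

-- ===== PORT B =====
def solution_alt (m : Int) (n : Int) (h_ : Int) (w : Int) (drops : List (Int × Int)) : List Int :=
  let time := buildTime m n drops
  let height := m - h_ + 1
  let width := n - w + 1
  ((PySem.List.pyRange 0 height 1).foldl (fun st i =>
      (PySem.List.pyRange 0 width 1).foldl (fun st j =>
        let cur := (PySem.List.min? ((PySem.List.pyRange i (i + h_) 1).flatMap (fun x =>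
            (PySem.List.pyRange j (j + w) 1).map (fun y => tget (tgetL time x) y))) (fun v => v)).getD 0
        if st.1 < cur then (cur, [i, j]) else st) st)
    ((-1 : Int), ([0, 0] : List Int))).2

-- ===== PRECONDITION & SPEC =====
-- Pre_ excludes drop coordinates outside [-m,m) × [-n,n) (A raises IndexError there) and nonpositive
-- window sizes h_ or w except in the degenerate cases where neither pass runs (A then raises IndexError
-- on an emptied deque, or — on an empty grid — still returns [0,0] where B's `min` of an empty window raises).
def Pre_solution (m : Int) (n : Int) (h_ : Int) (w : Int) (drops : List (Int × Int)) : Prop :=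
  (∀ p ∈ drops, -m ≤ p.1 ∧ p.1 < m ∧ -n ≤ p.2 ∧ p.2 < n) ∧
  ((1 ≤ h_ ∧ 1 ≤ w) ∨
    ((m - h_ + 1 ≤ 0 ∨ n - w + 1 ≤ 0) ∧ (1 ≤ w ∨ m ≤ 0 ∨ n ≤ 0) ∧
      (1 ≤ h_ ∨ m ≤ 0 ∨ n - w + 1 ≤ 0)))
instance (m : Int) (n : Int) (h_ : Int) (w : Int) (drops : List (Int × Int)) : Decidable (Pre_solution m n h_ w drops) := by unfold Pre_solution; infer_instance

def pvWitness_solution : Int × Int × Int × Int × (List (Int × Int)) := (3, 4, 2, 2, [(0, 0), (1, 1), (2, 3)])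

def Spec_solution (m : Int) (n : Int) (h_ : Int) (w : Int) (drops : List (Int × Int)) (out : List Int) : Prop := out = solution_alt m n h_ w drops
instance (m : Int) (n : Int) (h_ : Int) (w : Int) (drops : List (Int × Int)) (out : List Int) : Decidable (Spec_solution m n h_ w drops out) := by unfold Spec_solution; infer_instance

-- ===== CLAIM (what is proved, stated in full; the proofs are below) =====
def Claim_equal_solution : Prop := ∀ (m : Int) (n : Int) (h_ : Int) (w : Int) (drops : List (Int × Int)), Dom_solution m n h_ w drops → Pre_solution m n h_ w drops → Spec_solution m n h_ w drops (solution m n h_ w drops)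

-- ===== LEMMAS AND PROOFS =====

-- min of a nonempty list as a fold (Python's `min(xs)`)
def minv : List Int → Int
  | [] => 0
  | x :: xs => xs.foldl min x

-- minimum of t over the window [p, p+win)
def winMin (t : List Int) (p : Int) (win : Int) : Int :=
  minv ((PySem.List.pyRange p (p + win) 1).map (tget t))

theorem min?_id_eq (l : List Int) (hl : l ≠ []) :
    PySem.List.min? l (fun v => v) = some (minv l) := by
  cases l with
  | nil => exact absurd rfl hl
  | cons x xs => rw [PySem.List.min?_id_cons]; rfl

theorem minv_le (l : List Int) (x : Int) (hx : x ∈ l) : minv l ≤ x := by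
  have hl : l ≠ [] := List.ne_nil_of_mem hx
  have := PySem.List.min?_isMin (xs := l) (key := fun v => v) (min?_id_eq l hl)
  exact this x hx

theorem minv_mem (l : List Int) (hl : l ≠ []) : minv l ∈ l :=
  PySem.List.min?_mem (min?_id_eq l hl)

theorem minv_eq_of (l : List Int) (x : Int) (hx : x ∈ l) (h : ∀ y ∈ l, x ≤ y) : minv l = x :=
  le_antisymm (minv_le l x hx) (h _ (minv_mem l (List.ne_nil_of_mem hx)))

theorem minv_flatMap {α : Type} (l : List α) (g : α → List Int) (hl : l ≠ [])
    (hg : ∀ x ∈ l, g x ≠ []) :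
    minv (l.flatMap g) = minv (l.map (fun x => minv (g x))) := by
  have hmapne : l.map (fun x => minv (g x)) ≠ [] := by
    simpa using hl
  obtain ⟨x0, hx0, hx0e⟩ := List.mem_map.mp (minv_mem _ hmapne)
  refine minv_eq_of _ _ ?_ ?_
  · exact List.mem_flatMap.mpr ⟨x0, hx0, hx0e ▸ minv_mem _ (hg x0 hx0)⟩
  · intro y hy
    obtain ⟨x, hx, hyx⟩ := List.mem_flatMap.mp hy
    calc minv (l.map fun x => minv (g x)) ≤ minv (g x) :=
          minv_le _ _ (List.mem_map.mpr ⟨x, hx, rfl⟩)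
      _ ≤ y := minv_le _ _ hyx

-- the deque-pass state after processing indices 0..c-1
def runN (t : List Int) (len : Int) (win : Int) (c : Nat) : List Int × List Int :=
  (List.range c).foldl (fun st k => slideStep t win st (Int.ofNat k))
    ([], List.replicate (len - win + 1).toNat 0)

-- invariant of A's deque loop
def DequeInv (t : List Int) (len : Int) (win : Int) (c : Nat) (st : List Int × List Int) : Prop :=
  (∀ e ∈ st.1, (c : Int) - win ≤ e ∧ 0 ≤ e ∧ e < (c : Int)) ∧
  st.1.Pairwise (fun a b => a < b ∧ tget t a < tget t b) ∧
  (∀ k : Int, 0 ≤ k → (c : Int) - win ≤ k → k < (c : Int) →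
    ∃ e ∈ st.1, k ≤ e ∧ tget t e ≤ tget t k) ∧
  st.2.length = (len - win + 1).toNat ∧
  (∀ p : Nat, (p : Int) ≤ (c : Int) - win → (p : Int) < len - win + 1 →
    st.2.getD p 0 = winMin t (p : Int) win)

theorem mem_of_dropped {α : Type} (l : List α) (p : α → Bool) (x : α) (hx : x ∈ l)
    (hnx : x ∉ l.dropWhile p) : p x = true := by
  have hsplit : l.takeWhile p ++ l.dropWhile p = l := List.takeWhile_append_dropWhile
  have hx2 : x ∈ l.takeWhile p ++ l.dropWhile p := by rw [hsplit]; exact hx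
  rcases List.mem_append.mp hx2 with h | h
  · exact List.mem_takeWhile_imp h
  · exact absurd h hnx

theorem mem_dropWhile_of_false {α : Type} (l : List α) (p : α → Bool) (x : α) (hx : x ∈ l)
    (hpx : p x = false) : x ∈ l.dropWhile p := by
  by_contra hc
  rw [mem_of_dropped l p x hx hc] at hpx
  cases hpx

theorem dropWhile_head_false {α : Type} (p : α → Bool) :
    ∀ (l : List α) (b : α) (rest : List α), l.dropWhile p = b :: rest → p b = false := by
  intro l
  induction l with
  | nil => intro b rest h; simp at h
  | cons a tl ih =>
    intro b rest h
    by_cases hpa : p a = true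
    · rw [List.dropWhile_cons_of_pos hpa] at h; exact ih _ _ h
    · rw [List.dropWhile_cons_of_neg hpa] at h
      cases h
      simpa using hpa

theorem dropWhile_le_lt (t : List Int) (s : Int) (l : List Int)
    (hp : l.Pairwise (fun a b => a < b ∧ tget t a < tget t b)) :
    ∀ x ∈ l.dropWhile (fun k => decide (k ≤ s)), s < x := by
  induction l with
  | nil => simp
  | cons a tl ih =>
    intro x hx
    by_cases ha : a ≤ s
    · rw [List.dropWhile_cons_of_pos (by simpa using ha)] at hx
      exact ih hp.of_cons x hx
    · rw [List.dropWhile_cons_of_neg (by simpa using ha)] at hx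
      rcases List.mem_cons.mp hx with rfl | hx2
      · omega
      · have := ((List.pairwise_cons.mp hp).1 x hx2).1
        omega

theorem back_kept_lt (t : List Int) (j : Int) (d : List Int)
    (hp : d.Pairwise (fun a b => a < b ∧ tget t a < tget t b)) :
    ∀ a ∈ (d.reverse.dropWhile (fun k => decide (tget t j ≤ tget t k))).reverse,
      tget t a < tget t j := by
  intro a ha
  rw [List.mem_reverse] at ha
  have hrev : d.reverse.Pairwise (fun a b => b < a ∧ tget t b < tget t a) :=
    List.pairwise_reverse.mpr hp
  have hdk : (d.reverse.dropWhile (fun k => decide (tget t j ≤ tget t k))).Pairwise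
      (fun a b => b < a ∧ tget t b < tget t a) :=
    List.Pairwise.sublist (List.dropWhile_sublist _) hrev
  rcases hcons : d.reverse.dropWhile (fun k => decide (tget t j ≤ tget t k)) with _ | ⟨b0, rest⟩
  · rw [hcons] at ha; cases ha
  · have hb0 : tget t b0 < tget t j := by
      have := dropWhile_head_false _ _ _ _ hcons
      simpa using this
    rw [hcons] at ha hdk
    rcases List.mem_cons.mp ha with rfl | ha2
    · exact hb0
    · have := ((List.pairwise_cons.mp hdk).1 a ha2).2
      omega

theorem getD_set_eq (xs : List Int) (q : Nat) (v : Int) (h : q < xs.length) :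
    (xs.set q v).getD q 0 = v := by
  simp [List.getD, h]

theorem getD_set_ne (xs : List Int) (q p : Nat) (v : Int) (h : q ≠ p) :
    (xs.set q v).getD p 0 = xs.getD p 0 := by
  simp [List.getD, h]

theorem head_min (t : List Int) (win c : Int) (d : List Int)
    (hc : win ≤ c)
    (hmem : ∀ e ∈ d, c - win ≤ e ∧ 0 ≤ e ∧ e < c)
    (hpw : d.Pairwise (fun a b => a < b ∧ tget t a < tget t b))
    (hcov : ∀ k : Int, 0 ≤ k → c - win ≤ k → k < c → ∃ e ∈ d, k ≤ e ∧ tget t e ≤ tget t k)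
    (hne : d ≠ []) :
    tget t (d.headD 0) = winMin t (c - win) win := by
  obtain ⟨e0, rest, rfl⟩ := List.exists_cons_of_ne_nil hne
  simp only [List.headD_cons]
  unfold winMin
  refine (minv_eq_of _ _ ?_ ?_).symm
  · refine List.mem_map.mpr ⟨e0, ?_, rfl⟩
    have := hmem e0 List.mem_cons_self
    rw [PySem.List.mem_pyRange_one]
    omega
  · intro y hy
    obtain ⟨k, hk, rfl⟩ := List.mem_map.mp hy
    rw [PySem.List.mem_pyRange_one] at hk
    obtain ⟨e, he, hke, hfe⟩ := hcov k (by omega) (by omega) (by omega)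
    have he0 : tget t e0 ≤ tget t e := by
      rcases List.mem_cons.mp he with rfl | h2
      · exact le_refl _
      · exact le_of_lt ((List.pairwise_cons.mp hpw).1 e h2).2
    omega

theorem dstep_facts (t : List Int) (win : Int) (hwin : 1 ≤ win) (j : Int) (hj : 0 ≤ j)
    (d : List Int)
    (hmem : ∀ e ∈ d, j - win ≤ e ∧ 0 ≤ e ∧ e < j)
    (hpw : d.Pairwise (fun a b => a < b ∧ tget t a < tget t b))
    (hcov : ∀ k : Int, 0 ≤ k → j - win ≤ k → k < j → ∃ e ∈ d, k ≤ e ∧ tget t e ≤ tget t k) :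
    (∀ e ∈ dstep t win d j, j + 1 - win ≤ e ∧ 0 ≤ e ∧ e < j + 1) ∧
    (dstep t win d j).Pairwise (fun a b => a < b ∧ tget t a < tget t b) ∧
    (∀ k : Int, 0 ≤ k → j + 1 - win ≤ k → k < j + 1 →
      ∃ e ∈ dstep t win d j, k ≤ e ∧ tget t e ≤ tget t k) ∧
    j ∈ dstep t win d j := by
  set dk := d.reverse.dropWhile (fun k => decide (tget t j ≤ tget t k)) with hdkdef
  set d2 := dk.reverse ++ [j] with hd2def
  have hdstep : dstep t win d j = d2.dropWhile (fun k => decide (k ≤ j - win)) := rfl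
  have hdk_sub : ∀ a ∈ dk.reverse, a ∈ d := by
    intro a ha
    rw [List.mem_reverse] at ha
    have := (List.dropWhile_sublist _).subset ha
    rwa [List.mem_reverse] at this
  have hd2mem : ∀ e ∈ d2, e = j ∨ e ∈ d := by
    intro e he
    rcases List.mem_append.mp he with h1 | h1
    · exact Or.inr (hdk_sub e h1)
    · exact Or.inl (List.mem_singleton.mp h1)
  have hd2pw : d2.Pairwise (fun a b => a < b ∧ tget t a < tget t b) := by
    rw [List.pairwise_append]
    refine ⟨?_, List.pairwise_singleton _ _, ?_⟩
    · exact List.pairwise_reverse.mpr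
        (List.Pairwise.sublist (List.dropWhile_sublist _) (List.pairwise_reverse.mpr hpw))
    · intro a ha b hb
      rw [List.mem_singleton] at hb
      subst hb
      exact ⟨(hmem a (hdk_sub a ha)).2.2, back_kept_lt t b d hpw a ha⟩
  have hjd2 : j ∈ d2 := List.mem_append.mpr (Or.inr (List.mem_singleton.mpr rfl))
  have hjd' : j ∈ dstep t win d j := by
    rw [hdstep]
    exact mem_dropWhile_of_false d2 _ j hjd2 (by simp; omega)
  have hsubd2 : ∀ e ∈ dstep t win d j, e ∈ d2 := by
    intro e he
    rw [hdstep] at he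
    exact (List.dropWhile_sublist _).subset he
  have hlow : ∀ e ∈ dstep t win d j, j - win < e := by
    intro e he
    rw [hdstep] at he
    exact dropWhile_le_lt t (j - win) d2 hd2pw e he
  refine ⟨?_, ?_, ?_, hjd'⟩
  · intro e he
    have h1 := hlow e he
    rcases hd2mem e (hsubd2 e he) with rfl | hed
    · omega
    · have := hmem e hed
      omega
  · rw [hdstep]
    exact List.Pairwise.sublist (List.dropWhile_sublist _) hd2pw
  · intro k hk0 hklow hkhi
    by_cases hkj : k = j
    · subst hkj
      exact ⟨k, hjd', le_refl _, le_refl _⟩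
    · have hkc : k < j := by omega
      obtain ⟨e, he, hke, hfe⟩ := hcov k hk0 (by omega) hkc
      by_cases hedk : e ∈ dk.reverse
      · have hed2 : e ∈ d2 := List.mem_append.mpr (Or.inl hedk)
        by_cases hed' : e ∈ dstep t win d j
        · exact ⟨e, hed', hke, hfe⟩
        · exfalso
          have hdrop := mem_of_dropped d2 (fun k => decide (k ≤ j - win)) e hed2
            (by rw [hdstep] at hed'; exact hed')
          simp at hdrop
          omega
      · have hrev : e ∈ d.reverse := List.mem_reverse.mpr he
        have hdrop := mem_of_dropped d.reverse (fun k => decide (tget t j ≤ tget t k)) e hrev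
          (by intro hcm; exact hedk (List.mem_reverse.mpr hcm))
        simp at hdrop
        exact ⟨j, hjd', by omega, by omega⟩

theorem inv_step (t : List Int) (len win : Int) (hwin : 1 ≤ win) (c : Nat)
    (st : List Int × List Int) (h : DequeInv t len win c st) :
    DequeInv t len win (c + 1) (slideStep t win st (c : Int)) := by
  obtain ⟨hmem, hpw, hcov, hlen, hrow⟩ := h
  have hfacts := dstep_facts t win hwin (c : Int) (Int.natCast_nonneg c) st.1 hmem hpw hcov
  obtain ⟨hmem', hpw', hcov', hjin⟩ := hfacts
  have hne' : dstep t win st.1 (c : Int) ≠ [] := List.ne_nil_of_mem hjin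
  have hstep : slideStep t win st (c : Int) =
      (dstep t win st.1 (c : Int),
       if win - 1 ≤ (c : Int) then
         st.2.set ((c : Int) - win + 1).toNat (tget t ((dstep t win st.1 (c : Int)).headD 0))
       else st.2) := rfl
  rw [hstep]
  have hcast : ((c + 1 : Nat) : Int) = (c : Int) + 1 := by push_cast; ring
  refine ⟨?_, hpw', ?_, ?_, ?_⟩
  · intro e he
    have := hmem' e he
    omega
  · intro k hk0 hklow hkhi
    exact hcov' k hk0 (by omega) (by omega)
  · by_cases hcw : win - 1 ≤ (c : Int)
    · rw [if_pos hcw]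
      simpa using hlen
    · rw [if_neg hcw]; exact hlen
  · intro p hp1 hp2
    rw [hcast] at hp1
    by_cases hcw : win - 1 ≤ (c : Int)
    · rw [if_pos hcw]
      by_cases hpe : (p : Int) = (c : Int) - win + 1
      · have hq : ((c : Int) - win + 1).toNat = p := by omega
        rw [hq, getD_set_eq _ _ _ (by rw [hlen]; omega)]
        have hh := head_min t win ((c : Int) + 1) (dstep t win st.1 (c : Int)) (by omega)
          (by intro e he; have := hmem' e he; omega) hpw'
          (by intro k hk0 hklow hkhi; exact hcov' k hk0 (by omega) (by omega)) hne'
        rw [hh]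
        congr 1
        omega
      · rw [getD_set_ne _ _ _ _ (by omega)]
        exact hrow p (by omega) hp2
    · rw [if_neg hcw]
      exact hrow p (by omega) hp2

theorem runN_succ (t : List Int) (len win : Int) (c : Nat) :
    runN t len win (c + 1) = slideStep t win (runN t len win c) (c : Int) := by
  unfold runN
  rw [List.range_succ, List.foldl_append]
  rfl

theorem slideMin_eq_runN (t : List Int) (len win : Int) :
    slideMin t len win = (runN t len win len.toNat).2 := by
  unfold slideMin runN
  have hr : PySem.List.pyRange 0 len 1 = (List.range len.toNat).map (fun k => Int.ofNat k) := by
    rw [PySem.List.pyRange_one]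
    norm_num
  rw [hr, List.foldl_map]

theorem inv_runN (t : List Int) (len win : Int) (hwin : 1 ≤ win) (c : Nat) :
    DequeInv t len win c (runN t len win c) := by
  induction c with
  | zero =>
    refine ⟨by simp [runN], by simp [runN], by intro k hk0 hklow hkhi; omega, by simp [runN], ?_⟩
    intro p hp1 hp2
    exfalso
    omega
  | succ c ih =>
    rw [runN_succ]
    exact inv_step t len win hwin c _ ih

theorem slide_correct (t : List Int) (len win : Int) (hwin : 1 ≤ win) (p : Nat)
    (hp : (p : Int) < len - win + 1) :
    (slideMin t len win).getD p 0 = winMin t (p : Int) win := by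
  rw [slideMin_eq_runN]
  obtain ⟨-, -, -, -, hrow⟩ := inv_runN t len win hwin len.toNat
  exact hrow p (by omega) hp

theorem length_buildTime (m n : Int) (drops : List (Int × Int)) :
    (buildTime m n drops).length = m.toNat := by
  unfold buildTime
  have H : ∀ (l : List (Int × (Int × Int))) (tm : List (List Int)),
      (l.foldl (fun tm p =>
        PySem.List.pySetD tm p.2.1 (PySem.List.pySetD (tgetL tm p.2.1) p.2.2 (p.1 + 1))) tm).length
        = tm.length := by
    intro l
    induction l with
    | nil => intro tm; rfl
    | cons a tl ih =>
      intro tm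
      rw [List.foldl_cons, ih, PySem.List.length_pySetD]
  rw [H]
  simp

theorem tget_slideMin (t : List Int) (len win : Int) (hwin : 1 ≤ win) (i : Int)
    (hi0 : 0 ≤ i) (hi : i < len - win + 1) :
    tget (slideMin t len win) i = winMin t i win := by
  unfold tget
  rw [show i = ((i.toNat : Nat) : Int) by omega, PySem.List.pyGetD_natCast]
  rw [slide_correct t len win hwin i.toNat (by omega)]

theorem tgetL_eq_getElem (g : List (List Int)) (x : Int) (hx0 : 0 ≤ x)
    (hx : x.toNat < g.length) : tgetL g x = g[x.toNat] := by
  unfold tgetL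
  conv_lhs => rw [show x = ((x.toNat : Nat) : Int) by omega, PySem.List.pyGetD_natCast]
  exact List.getD_eq_getElem g [] hx



theorem tgetL_map_pyRange (f : Int → List Int) (b i : Int) (h0 : 0 ≤ i) (h : i < b) :
    tgetL ((PySem.List.pyRange 0 b 1).map f) i = f i := by
  unfold tgetL
  exact PySem.List.pyGetD_map_pyRange_of_nonneg f b i [] h0 h

theorem tget_map_pyRange (f : Int → Int) (b i : Int) (h0 : 0 ≤ i) (h : i < b) :
    tget ((PySem.List.pyRange 0 b 1).map f) i = f i := by
  unfold tget
  exact PySem.List.pyGetD_map_pyRange_of_nonneg f b i 0 h0 h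

theorem tget_map {α : Type} (F : α → Int) (g : List α) (x : Int) (hx0 : 0 ≤ x)
    (hx : x.toNat < g.length) : tget (g.map F) x = F g[x.toNat] := by
  unfold tget
  conv_lhs => rw [show x = ((x.toNat : Nat) : Int) by omega, PySem.List.pyGetD_natCast]
  rw [List.getD_eq_getElem _ _ (by simpa using hx), List.getElem_map]

-- ===== VERDICT (by name: the statement is the Claim_ definition above) =====
theorem solution_spec : Claim_equal_solution := by
  unfold Claim_equal_solution Spec_solution
  intro m n h_ w drops _ hpre
  obtain ⟨-, hcase⟩ := hpre
  rcases hcase with ⟨hh, hw⟩ | ⟨hd, -, -⟩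
  case inr =>
    -- degenerate case: height ≤ 0 or width ≤ 0, neither scan does anything, both return [0, 0]
    simp only [solution, solution_alt]
    rcases hd with hd | hd
    · rw [PySem.List.pyRange_one_eq_nil (show m - h_ + 1 ≤ 0 by omega)]
      rfl
    · rw [PySem.List.pyRange_one_eq_nil (show n - w + 1 ≤ 0 by omega)]
      simp only [List.foldl_nil, List.foldl_fixed]
  simp only [solution, solution_alt]
  refine congrArg Prod.snd ?_
  apply PySem.List.foldl_congr_mem
  intro st i hi
  apply PySem.List.foldl_congr_mem
  intro st' j hj
  rw [PySem.List.mem_pyRange_one] at hi hj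
  have htlen := length_buildTime m n drops
  have hm0 : (0 : Int) < m := by omega
  -- A side: extract the rectangle minimum from the two deque passes
  rw [tgetL_map_pyRange _ _ _ hi.1 hi.2]
  rw [tget_map_pyRange _ _ _ hj.1 hj.2]
  rw [tgetL_map_pyRange _ _ _ hj.1 hj.2]
  rw [tget_slideMin _ m h_ hh i hi.1 hi.2]
  rw [List.map_map]
  -- B side: `min` of the flattened window
  have hiin : i ∈ PySem.List.pyRange i (i + h_) 1 :=
    PySem.List.mem_pyRange_one.mpr ⟨le_refl i, by omega⟩
  have hjin : j ∈ PySem.List.pyRange j (j + w) 1 :=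
    PySem.List.mem_pyRange_one.mpr ⟨le_refl j, by omega⟩
  have hl : PySem.List.pyRange i (i + h_) 1 ≠ [] := List.ne_nil_of_mem hiin
  have hg : ∀ x ∈ PySem.List.pyRange i (i + h_) 1,
      (PySem.List.pyRange j (j + w) 1).map
        (fun y => tget (tgetL (buildTime m n drops) x) y) ≠ [] := by
    intro x hx
    simp only [ne_eq, List.map_eq_nil_iff]
    exact List.ne_nil_of_mem hjin
  have hvne : (PySem.List.pyRange i (i + h_) 1).flatMap
      (fun x => (PySem.List.pyRange j (j + w) 1).map
        (fun y => tget (tgetL (buildTime m n drops) x) y)) ≠ [] := by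
    exact List.ne_nil_of_mem (a := tget (tgetL (buildTime m n drops) i) j)
      (List.mem_flatMap.mpr ⟨i, hiin, List.mem_map.mpr ⟨j, hjin, rfl⟩⟩)
  rw [min?_id_eq _ hvne, Option.getD_some]
  rw [minv_flatMap _ _ hl hg]
  unfold winMin
  have hpt : ∀ x ∈ PySem.List.pyRange i (i + h_) 1,
      tget ((buildTime m n drops).map
        ((fun r => tget r j) ∘ (fun t => slideMin t n w))) x =
      minv ((PySem.List.pyRange j (j + w) 1).map
        (fun y => tget (tgetL (buildTime m n drops) x) y)) := by
    intro x hx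
    rw [PySem.List.mem_pyRange_one] at hx
    have hxb : x.toNat < (buildTime m n drops).length := by rw [htlen]; omega
    rw [tget_map _ _ _ (by omega) hxb, Function.comp_apply]
    rw [tget_slideMin _ n w hw j hj.1 hj.2]
    rw [tgetL_eq_getElem _ _ (by omega) hxb]
    rfl
  rw [congrArg minv (List.map_congr_left hpt)]
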